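-- pv_equiv track=rewrite | github.com/dongyifeng/dyf_py | zuo_shen/刷题/max_gap.py | max_gap2
-- ===== SOURCE A (Python) =====
-- def max_gap2(nums):
--     if not nums or len(nums) < 2: return 0
--     nums.sort()
--     res = 0
--     last_value = nums[0]
--     for i in range(1, len(nums)):
--         res = max(res, nums[i] - last_value)
--         last_value = nums[i]
--     return res
-- ===== SOURCE B (Python) =====
-- def max_gap2(nums):
--     # Bucket-based (pigeonhole) maximum gap, O(n); does not mutate nums (A sorts it in place).
--     n = len(nums)
--     if n < 2:
--         return 0
--     mn = min(nums)
--     mx = max(nums)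
--     if mn == mx:
--         return 0
--     size = max(1, (mx - mn) // (n - 1))
--     nb = (mx - mn) // size + 1
--     b = {}
--     for x in nums:
--         i = (x - mn) // size
--         if i in b:
--             lo, hi = b[i]
--             b[i] = (min(lo, x), max(hi, x))
--         else:
--             b[i] = (x, x)
--     res = 0
--     prev = None
--     for i in range(nb):
--         if i in b:
--             lo, hi = b[i]
--             if prev is not None:
--                 res = max(res, lo - prev)
--             prev = hi
--     return res
-- ===== Notes on version B (the rewrite author's own statement) =====
-- stated objective: alternative
-- what changed: B replaces A's sort-then-scan-adjacent-differences with the classic pigeonhole bucket algorithm: it buckets values by ((x-min)//size) with size=max(1,(max-min)//(n-1)), keeps only per-bucket min/max, and takes the maximum of (bucket min - previous bucket max) over consecutive non-empty buckets; no sorting at all, and B does not mutate its argument while A sorts it in place.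
import Mathlib
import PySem

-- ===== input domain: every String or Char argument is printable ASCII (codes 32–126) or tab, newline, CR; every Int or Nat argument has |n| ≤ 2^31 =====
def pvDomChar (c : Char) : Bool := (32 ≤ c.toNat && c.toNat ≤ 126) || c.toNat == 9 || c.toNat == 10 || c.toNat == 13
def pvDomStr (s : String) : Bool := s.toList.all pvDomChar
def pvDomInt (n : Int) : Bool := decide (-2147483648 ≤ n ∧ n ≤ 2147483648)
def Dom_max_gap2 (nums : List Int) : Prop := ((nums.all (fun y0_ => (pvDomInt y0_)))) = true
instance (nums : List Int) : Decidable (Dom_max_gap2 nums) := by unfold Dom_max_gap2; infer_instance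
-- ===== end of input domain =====

-- B replaces A's sort + adjacent-difference scan with the pigeonhole bucket algorithm
-- (per-bucket min/max, max of gaps between consecutive non-empty buckets); A sorts its
-- argument in place — the equivalence proved here is about the return value only.

-- ===== PORT A =====
-- for i in range(1, len(nums)): reads nums[i]; ported as a fold over the tail of the
-- sorted list with the same state (res, last_value).
def max_gap2 (nums : List Int) : Int :=
  if nums = [] ∨ nums.length < 2 then 0
  else
    match PySem.List.sorted nums (fun x => x) false with
    | [] => 0  -- unreachable: nums ≠ []
    | h :: t =>
      (t.foldl (fun (st : Int × Int) x => (max st.1 (x - st.2), x)) ((0 : Int), h)).1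

-- ===== PORT B =====
-- body of 'for x in nums': bucket dict update (i in b ↔ get? i = some _)
def bucketStep (size mn : Int) (b : PySem.Dict Int (Int × Int)) (x : Int) : PySem.Dict Int (Int × Int) :=
  let i := PySem.Int.floordiv (x - mn) size
  match b.get? i with
  | some (lo, hi) => b.insert i (min lo x, max hi x)
  | none => b.insert i (x, x)

-- body of 'for i in range(nb)': state (res, prev) with prev = None initially
def scanStep (b : PySem.Dict Int (Int × Int)) (st : Int × Option Int) (i : Int) : Int × Option Int :=
  match b.get? i with
  | none => st
  | some (lo, hi) =>
    match st.2 with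
    | none => (st.1, some hi)
    | some p => (max st.1 (lo - p), some hi)

def max_gap2_alt (nums : List Int) : Int :=
  let n : Int := nums.length
  if n < 2 then 0
  else
    match PySem.List.min? nums (fun x => x), PySem.List.max? nums (fun x => x) with
    | some mn, some mx =>
      if mn = mx then 0
      else
        let size := max 1 (PySem.Int.floordiv (mx - mn) (n - 1))
        let nb := PySem.Int.floordiv (mx - mn) size + 1
        let b := nums.foldl (bucketStep size mn) PySem.Dict.empty
        ((PySem.List.pyRange 0 nb 1).foldl (scanStep b) ((0 : Int), (none : Option Int))).1
    | _, _ => 0  -- unreachable: n ≥ 2 so nums ≠ []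

-- ===== PRECONDITION & SPEC =====
def Spec_max_gap2 (nums : List Int) (out : Int) : Prop := out = max_gap2_alt nums
instance (nums : List Int) (out : Int) : Decidable (Spec_max_gap2 nums out) := by unfold Spec_max_gap2; infer_instance

-- ===== CLAIM (what is proved, stated in full; the proofs are below) =====
def Claim_equal_max_gap2 : Prop := ∀ (nums : List Int), Dom_max_gap2 nums → Spec_max_gap2 nums (max_gap2 nums)

-- ===== LEMMAS AND PROOFS =====

-- maximal adjacent difference of (p :: l), 0 for the empty tail
def gapMax : Int → List Int → Int
  | _, [] => 0
  | p, b :: t => max (b - p) (gapMax b t)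

-- maximal adjacent difference of l
def adjMax : List Int → Int
  | [] => 0
  | a :: t => gapMax a t

-- bucket index of x
def bidx (mn size x : Int) : Int := PySem.Int.floordiv (x - mn) size

-- the per-bucket min/max dict is correct for the elements seen so far
def BChar (f : Int → Int) (seen : List Int) (d : PySem.Dict Int (Int × Int)) : Prop :=
  ∀ j : Int,
    (d.get? j = none → ∀ y ∈ seen, f y ≠ j) ∧
    (∀ lo hi, d.get? j = some (lo, hi) →
      lo ∈ seen ∧ hi ∈ seen ∧ f lo = j ∧ f hi = j ∧ ∀ y ∈ seen, f y = j → lo ≤ y ∧ y ≤ hi)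

theorem gapMax_nonneg (p : Int) (t : List Int) (h : (p :: t).Pairwise (· ≤ ·)) :
    0 ≤ gapMax p t := by
  induction t generalizing p with
  | nil => simp [gapMax]
  | cons b t ih =>
    simp only [gapMax, le_max_iff]
    left
    have : p ≤ b := (List.pairwise_cons.mp h).1 b (by simp)
    omega

theorem adjMax_nonneg (l : List Int) (h : l.Pairwise (· ≤ ·)) : 0 ≤ adjMax l := by
  cases l with
  | nil => simp [adjMax]
  | cons a t => exact gapMax_nonneg a t h

-- A's loop computes max res (gapMax h t)
theorem foldA_eq (t : List Int) (h res : Int) (hres : 0 ≤ res) :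
    (t.foldl (fun (st : Int × Int) x => (max st.1 (x - st.2), x)) (res, h)).1
      = max res (gapMax h t) := by
  induction t generalizing h res with
  | nil => simp [gapMax, max_eq_left hres]
  | cons b t ih =>
    simp only [List.foldl_cons]
    rw [ih b (max res (b - h)) (le_trans hres (le_max_left _ _))]
    simp only [gapMax]
    rw [max_assoc]

-- head of a ≤-sorted list is a lower bound of its members
theorem head_lb (a : Int) (t : List Int) (h : (a :: t).Pairwise (· ≤ ·)) :
    ∀ x ∈ a :: t, a ≤ x := by
  intro x hx
  rcases List.mem_cons.mp hx with rfl | hx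
  · exact le_refl x
  · exact (List.pairwise_cons.mp h).1 x hx

-- two sorted lists (one weakly, one strictly) with the same members have the same adjMax
theorem adjMax_eq_of_mem (l l' : List Int) (hl : l.Pairwise (· ≤ ·))
    (hl' : l'.Pairwise (· < ·)) (hm : ∀ x, x ∈ l ↔ x ∈ l') :
    adjMax l = adjMax l' := by
  induction l generalizing l' with
  | nil =>
    have : l' = [] := by
      cases l' with
      | nil => rfl
      | cons a t => exact absurd ((hm a).mpr (by simp)) (by simp)
    simp [this]
  | cons a t ih =>
    obtain ⟨a', t', rfl⟩ : ∃ a' t', l' = a' :: t' := by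
      cases l' with
      | nil => exact absurd ((hm a).mp (by simp)) (by simp)
      | cons a' t' => exact ⟨a', t', rfl⟩
    have ha'lb : ∀ x ∈ a' :: t', a' ≤ x := by
      intro x hx
      rcases List.mem_cons.mp hx with rfl | hx
      · exact le_refl x
      · exact le_of_lt ((List.pairwise_cons.mp hl').1 x hx)
    have heq : a = a' := le_antisymm
      (head_lb a t hl a' ((hm a').mpr (by simp)))
      (ha'lb a ((hm a).mp (by simp)))
    subst heq
    have hanotint' : a ∉ t' := fun hx => absurd ((List.pairwise_cons.mp hl').1 a hx) (lt_irrefl a)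
    cases t with
    | nil =>
      have : t' = [] := by
        cases t' with
        | nil => rfl
        | cons c u =>
          have hc : c ∈ [a] := (hm c).mpr (by simp)
          have : c = a := by simpa using hc
          exact absurd ((List.pairwise_cons.mp hl').1 c (by simp)) (by omega)
      simp [this, adjMax, gapMax]
    | cons b t2 =>
      have hab : a ≤ b := (List.pairwise_cons.mp hl).1 b (by simp)
      have htail : (b :: t2).Pairwise (· ≤ ·) := (List.pairwise_cons.mp hl).2
      rcases lt_or_eq_of_le hab with hlt | heq2
      · have hanotbt : a ∉ b :: t2 := by
          intro hx
          have := head_lb b t2 htail a hx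
          omega
        have hmem' : ∀ x, x ∈ b :: t2 ↔ x ∈ t' := by
          intro x
          constructor
          · intro hx
            have hx' : x ∈ a :: t' := (hm x).mp (List.mem_cons_of_mem a hx)
            rcases List.mem_cons.mp hx' with rfl | h
            · exact absurd hx hanotbt
            · exact h
          · intro hx
            have hx' : x ∈ a :: b :: t2 := (hm x).mpr (List.mem_cons_of_mem a hx)
            rcases List.mem_cons.mp hx' with rfl | h
            · exact absurd hx hanotint'
            · exact h
        obtain ⟨c, u, rfl⟩ : ∃ c u, t' = c :: u := by
          cases t' with
          | nil => exact absurd ((hmem' b).mp (by simp)) (by simp)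
          | cons c u => exact ⟨c, u, rfl⟩
        have ht' : (c :: u).Pairwise (· < ·) := (List.pairwise_cons.mp hl').2
        have hcu : ∀ x ∈ c :: u, c ≤ x := by
          intro x hx
          rcases List.mem_cons.mp hx with rfl | hx
          · exact le_refl x
          · exact le_of_lt ((List.pairwise_cons.mp ht').1 x hx)
        have hbc : b = c := le_antisymm
          (head_lb b t2 htail c ((hmem' c).mpr (by simp)))
          (hcu b ((hmem' b).mp (by simp)))
        subst hbc
        have hrec := ih _ htail ht' hmem'
        simp only [adjMax, gapMax] at hrec ⊢
        rw [hrec]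
      · subst heq2
        have hmem2 : ∀ x, x ∈ a :: t2 ↔ x ∈ a :: t' := by
          intro x
          rw [← hm x]
          constructor
          · intro hx
            rcases List.mem_cons.mp hx with rfl | hx
            · simp
            · simp [hx]
          · intro hx
            rcases List.mem_cons.mp hx with rfl | hx
            · simp
            · rcases List.mem_cons.mp hx with rfl | hx
              · simp
              · simp [hx]
        have hrec := ih _ htail hl' hmem2
        simp only [adjMax, gapMax] at hrec ⊢
        rw [← hrec, max_comm, max_eq_left]
        have := gapMax_nonneg a t2 htail
        omega

-- a list with at most one element has adjMax 0
theorem adjMax_short (l : List Int) (h : l.length ≤ 1) : adjMax l = 0 := by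
  match l with
  | [] => simp [adjMax]
  | [a] => simp [adjMax, gapMax]
  | a :: b :: t => simp at h

-- sorting nums and sorting its distinct values gives the same adjMax
theorem adjMax_sorted_eq (nums : List Int) :
    adjMax (PySem.List.sorted nums (fun x => x) false)
      = adjMax (PySem.List.sorted (PySem.Set.ofList nums) (fun x => x) false) := by
  apply adjMax_eq_of_mem
  · exact PySem.List.sorted_pairwise nums (fun x => x)
  · exact PySem.List.sorted_ofList_pairwise_lt (xs := nums)
  · intro x
    rw [PySem.List.mem_sorted, PySem.List.mem_sorted, PySem.Set.mem_ofList]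

-- A's result is the maximal adjacent gap of the strictly sorted distinct values
theorem thmA (nums : List Int) :
    max_gap2 nums = adjMax (PySem.List.sorted (PySem.Set.ofList nums) (fun x => x) false) := by
  unfold max_gap2
  rw [← adjMax_sorted_eq]
  split_ifs with hsmall
  · have hlen : (PySem.List.sorted nums (fun x => x) false).length ≤ 1 := by
      rw [PySem.List.length_sorted]
      rcases hsmall with rfl | h
      · simp
      · omega
    rw [adjMax_short _ hlen]
  · match hs : PySem.List.sorted nums (fun x => x) false with
    | [] => simp [adjMax]
    | h :: t =>
      show (t.foldl (fun (st : Int × Int) x => (max st.1 (x - st.2), x)) ((0 : Int), h)).1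
        = adjMax (h :: t)
      rw [foldA_eq t h 0 le_rfl]
      simp only [adjMax]
      have hpw : (h :: t).Pairwise (· ≤ ·) := by
        rw [← hs]
        exact PySem.List.sorted_pairwise nums (fun x => x)
      rw [max_comm, max_eq_left (gapMax_nonneg h t hpw)]

-- floor-division brackets
theorem fd_bounds (a b : Int) (hb : 0 < b) :
    PySem.Int.floordiv a b * b ≤ a ∧ a < (PySem.Int.floordiv a b + 1) * b :=
  (PySem.Int.floordiv_eq_iff_of_pos hb).mp rfl

theorem bidx_mono (mn size x y : Int) (hs : 0 < size) (h : x ≤ y) :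
    bidx mn size x ≤ bidx mn size y := by
  by_contra hc
  push_neg at hc
  have h1 := fd_bounds (x - mn) size hs
  have h2 := fd_bounds (y - mn) size hs
  unfold bidx at hc
  nlinarith [h1.1, h2.2]

theorem same_bucket_gap (mn size x y : Int) (hs : 0 < size) (hxy : x ≤ y)
    (h : bidx mn size x = bidx mn size y) : y - x < size := by
  have h1 := fd_bounds (x - mn) size hs
  have h2 := fd_bounds (y - mn) size hs
  unfold bidx at h
  nlinarith [h1.1, h2.2]

theorem bidx_self (mn size : Int) (hs : 0 < size) : bidx mn size mn = 0 := by
  unfold bidx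
  rw [PySem.Int.floordiv_eq_iff_of_pos hs]
  constructor <;> simp <;> omega

-- one bucket update preserves BChar
theorem bchar_step (size mn : Int) (x : Int) (seen : List Int) (d : PySem.Dict Int (Int × Int))
    (hd : BChar (bidx mn size) seen d) :
    BChar (bidx mn size) (seen ++ [x]) (bucketStep size mn d x) := by
  unfold bucketStep
  rw [show PySem.Int.floordiv (x - mn) size = bidx mn size x from rfl]
  rcases hg : d.get? (bidx mn size x) with _ | ⟨lo0, hi0⟩ <;> simp only [hg] <;> intro j <;>
    constructor
  · -- none-branch, get? j = none
    intro hnone y hy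
    rw [PySem.Dict.get?_insert] at hnone
    split_ifs at hnone with hji
    rcases List.mem_append.mp hy with hy | hy
    · exact (hd j).1 hnone y hy
    · simp only [List.mem_singleton] at hy; subst hy
      intro hfy; exact hji hfy.symm
  · -- none-branch, get? j = some (lo, hi)
    intro lo hi hsome
    rw [PySem.Dict.get?_insert] at hsome
    split_ifs at hsome with hji
    · subst hji
      simp only [Option.some.injEq, Prod.mk.injEq] at hsome
      obtain ⟨rfl, rfl⟩ := hsome
      refine ⟨List.mem_append_right _ (by simp), List.mem_append_right _ (by simp), rfl, rfl, ?_⟩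
      intro y hy hfy
      rcases List.mem_append.mp hy with hy | hy
      · exact absurd hfy ((hd _).1 hg y hy)
      · simp only [List.mem_singleton] at hy; subst hy; exact ⟨le_refl _, le_refl _⟩
    · have hold := (hd j).2 lo hi hsome
      refine ⟨List.mem_append_left _ hold.1, List.mem_append_left _ hold.2.1,
        hold.2.2.1, hold.2.2.2.1, ?_⟩
      intro y hy hfy
      rcases List.mem_append.mp hy with hy | hy
      · exact hold.2.2.2.2 y hy hfy
      · simp only [List.mem_singleton] at hy; subst hy; exact absurd hfy.symm hji
  · -- some-branch, get? j = none
    intro hnone y hy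
    rw [PySem.Dict.get?_insert] at hnone
    split_ifs at hnone with hji
    rcases List.mem_append.mp hy with hy | hy
    · exact (hd j).1 hnone y hy
    · simp only [List.mem_singleton] at hy; subst hy
      intro hfy; exact hji hfy.symm
  · -- some-branch, get? j = some (lo, hi)
    intro lo hi hsome
    rw [PySem.Dict.get?_insert] at hsome
    have hold := (hd _).2 lo0 hi0 hg
    split_ifs at hsome with hji
    · subst hji
      simp only [Option.some.injEq, Prod.mk.injEq] at hsome
      obtain ⟨rfl, rfl⟩ := hsome
      refine ⟨?_, ?_, ?_, ?_, ?_⟩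
      · rcases le_total lo0 x with h | h
        · rw [min_eq_left h]; exact List.mem_append_left _ hold.1
        · rw [min_eq_right h]; exact List.mem_append_right _ (by simp)
      · rcases le_total hi0 x with h | h
        · rw [max_eq_right h]; exact List.mem_append_right _ (by simp)
        · rw [max_eq_left h]; exact List.mem_append_left _ hold.2.1
      · rcases le_total lo0 x with h | h
        · rw [min_eq_left h]; exact hold.2.2.1
        · rw [min_eq_right h]
      · rcases le_total hi0 x with h | h
        · rw [max_eq_right h]
        · rw [max_eq_left h]; exact hold.2.2.2.1
      · intro y hy hfy
        rcases List.mem_append.mp hy with hy | hy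
        · have := hold.2.2.2.2 y hy hfy
          exact ⟨le_trans (min_le_left _ _) this.1, le_trans this.2 (le_max_left _ _)⟩
        · simp only [List.mem_singleton] at hy; subst hy
          exact ⟨min_le_right _ _, le_max_right _ _⟩
    · have hnew := (hd j).2 lo hi hsome
      refine ⟨List.mem_append_left _ hnew.1, List.mem_append_left _ hnew.2.1,
        hnew.2.2.1, hnew.2.2.2.1, ?_⟩
      intro y hy hfy
      rcases List.mem_append.mp hy with hy | hy
      · exact hnew.2.2.2.2 y hy hfy
      · simp only [List.mem_singleton] at hy; subst hy; exact absurd hfy.symm hji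

-- the dict fold satisfies BChar
theorem bchar_fold (size mn : Int) (xs : List Int) : ∀ (seen : List Int) (d : PySem.Dict Int (Int × Int)),
    BChar (bidx mn size) seen d →
    BChar (bidx mn size) (seen ++ xs) (xs.foldl (bucketStep size mn) d) := by
  induction xs with
  | nil => intro seen d hd; simpa using hd
  | cons x xs ih =>
    intro seen d hd
    have h1 := bchar_step size mn x seen d hd
    have := ih (seen ++ [x]) (bucketStep size mn d x) h1
    simpa using this

theorem bchar_empty (size mn : Int) : BChar (bidx mn size) [] PySem.Dict.empty := by
  intro j
  constructor
  · intro _ y hy; simp at hy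
  · intro lo hi h
    rw [PySem.Dict.get?_empty] at h
    exact absurd h (by simp)

-- no element strictly between two members ⇒ their gap is an adjacent gap
theorem between_le_adjMax (S : List Int) (hS : S.Pairwise (· < ·)) (a c : Int)
    (ha : a ∈ S) (hc : c ∈ S) (hlt : a < c) (hbt : ∀ y ∈ S, y ≤ a ∨ c ≤ y) :
    c - a ≤ adjMax S := by
  induction S with
  | nil => simp at ha
  | cons x t ih =>
    match t, hS with
    | [], _ =>
      simp only [List.mem_singleton] at ha hc
      omega
    | y :: t2, hS =>
      have hxy : x < y := (List.pairwise_cons.mp hS).1 y (by simp)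
      have htail : (y :: t2).Pairwise (· < ·) := (List.pairwise_cons.mp hS).2
      have hxall : ∀ z ∈ y :: t2, x < z := (List.pairwise_cons.mp hS).1
      simp only [adjMax, gapMax]
      by_cases hax : a = x
      · subst hax
        have hcy : c = y := by
          have hcne : c ≠ a := by omega
          have hct : c ∈ y :: t2 := by
            rcases List.mem_cons.mp hc with rfl | h
            · omega
            · exact h
          have hyc : y ≤ c := by
            rcases List.mem_cons.mp hct with rfl | h
            · exact le_refl _
            · exact le_of_lt ((List.pairwise_cons.mp htail).1 c h)
          rcases hbt y (by simp) with h | h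
          · omega
          · omega
        subst hcy
        exact le_max_of_le_left (by omega)
      · have hat : a ∈ y :: t2 := by
          rcases List.mem_cons.mp ha with rfl | h
          · exact absurd rfl hax
          · exact h
        have hct : c ∈ y :: t2 := by
          rcases List.mem_cons.mp hc with rfl | h
          · exact absurd (hxall a hat) (by omega)
          · exact h
        have hbt' : ∀ z ∈ y :: t2, z ≤ a ∨ c ≤ z := fun z hz => hbt z (List.mem_cons_of_mem x hz)
        have := ih (by exact htail) hat hct hbt'
        simp only [adjMax] at this
        exact le_max_of_le_right this

-- if every no-element-between pair has gap ≤ K then adjMax ≤ K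
theorem adjMax_le_of_gaps (S : List Int) (K : Int) (hK : 0 ≤ K) (hS : S.Pairwise (· < ·))
    (h : ∀ a c, a ∈ S → c ∈ S → a < c → (∀ y ∈ S, y ≤ a ∨ c ≤ y) → c - a ≤ K) :
    adjMax S ≤ K := by
  induction S with
  | nil => simpa [adjMax]
  | cons x t ih =>
    match t, hS with
    | [], _ => simpa [adjMax, gapMax]
    | y :: t2, hS =>
      have hxy : x < y := (List.pairwise_cons.mp hS).1 y (by simp)
      have htail : (y :: t2).Pairwise (· < ·) := (List.pairwise_cons.mp hS).2
      have hxall : ∀ z ∈ y :: t2, x < z := (List.pairwise_cons.mp hS).1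
      simp only [adjMax, gapMax, max_le_iff]
      constructor
      · refine h x y (by simp) (by simp) hxy ?_
        intro z hz
        rcases List.mem_cons.mp hz with rfl | hz
        · left; exact le_refl _
        · rcases List.mem_cons.mp hz with rfl | hz
          · right; exact le_refl _
          · right; exact le_of_lt ((List.pairwise_cons.mp htail).1 z hz)
      · have := ih (by exact htail) ?_
        · simpa [adjMax] using this
        · intro a c hat hct hac hbt
          refine h a c (List.mem_cons_of_mem x hat) (List.mem_cons_of_mem x hct) hac ?_
          intro z hz
          rcases List.mem_cons.mp hz with rfl | hz
          · left; exact le_of_lt (hxall a hat)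
          · exact hbt z hz

-- pigeonhole: every member is within adjMax * (length - 1) of the head
theorem span_le (a : Int) (t : List Int) (h : (a :: t).Pairwise (· ≤ ·)) :
    ∀ c ∈ a :: t, c - a ≤ gapMax a t * t.length := by
  induction t generalizing a with
  | nil => intro c hc; simp only [List.mem_singleton] at hc; subst hc; simp [gapMax]
  | cons b t ih =>
    intro c hc
    have hab : a ≤ b := (List.pairwise_cons.mp h).1 b (by simp)
    have htail : (b :: t).Pairwise (· ≤ ·) := (List.pairwise_cons.mp h).2
    have hG0 : 0 ≤ gapMax a (b :: t) := gapMax_nonneg a (b :: t) h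
    have hG1 : gapMax b t ≤ gapMax a (b :: t) := by simp [gapMax]
    have hG2 : b - a ≤ gapMax a (b :: t) := by simp [gapMax]
    rcases List.mem_cons.mp hc with rfl | hct
    · have : (0 : Int) ≤ (b :: t).length := by positivity
      nlinarith
    · have hrec := ih b htail c hct
      have hlen : ((b :: t).length : Int) = (t.length : Int) + 1 := by simp
      have hmul : gapMax b t * t.length ≤ gapMax a (b :: t) * t.length := by
        apply mul_le_mul_of_nonneg_right hG1 (by positivity)
      calc c - a = (c - b) + (b - a) := by ring
        _ ≤ gapMax b t * t.length + gapMax a (b :: t) := by omega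
        _ ≤ gapMax a (b :: t) * t.length + gapMax a (b :: t) := by omega
        _ = gapMax a (b :: t) * (b :: t).length := by rw [hlen]; ring

-- scan upper bound
theorem scan_ub (nums : List Int) (mn size nb A : Int) (b : PySem.Dict Int (Int × Int))
    (hs : 0 < size)
    (hchar : BChar (bidx mn size) nums b)
    (hbetween : ∀ a c, a ∈ nums → c ∈ nums → a < c → (∀ y ∈ nums, y ≤ a ∨ c ≤ y) → c - a ≤ A) :
    ∀ (k : Nat) (i : Int) (st : Int × Option Int), nb - i ≤ (k : Int) →
      st.1 ≤ A →
      (∀ p, st.2 = some p → p ∈ nums ∧ bidx mn size p < i ∧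
        (∀ y ∈ nums, bidx mn size p < bidx mn size y → i ≤ bidx mn size y) ∧
        (∀ y ∈ nums, bidx mn size y = bidx mn size p → y ≤ p)) →
      ((PySem.List.pyRange i nb 1).foldl (scanStep b) st).1 ≤ A := by
  intro k
  induction k with
  | zero =>
    intro i st hk hres _
    rw [PySem.List.pyRange_one_eq_nil (by exact_mod_cast le_of_sub_nonpos (by simpa using hk))]
    exact hres
  | succ k ih =>
    intro i st hk hres hprev
    by_cases hlt : i < nb
    · rw [PySem.List.pyRange_one_cons hlt]
      simp only [List.foldl_cons]
      rcases hg : b.get? i with _ | ⟨lo, hi⟩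
      · have hstep : scanStep b st i = st := by unfold scanStep; rw [hg]
        rw [hstep]
        apply ih (i + 1) st (by push_cast; push_cast at hk; omega) hres
        intro p hp
        obtain ⟨hp1, hp2, hp3, hp4⟩ := hprev p hp
        refine ⟨hp1, by omega, ?_, hp4⟩
        intro y hy hgt
        have h1 := hp3 y hy hgt
        have hne : bidx mn size y ≠ i := (hchar i).1 hg y hy
        omega
      · have hold := (hchar i).2 lo hi hg
        rcases hst : st.2 with _ | p
        · have hstep : scanStep b st i = (st.1, some hi) := by unfold scanStep; rw [hg, hst]
          rw [hstep]
          apply ih (i + 1) (st.1, some hi) (by push_cast; push_cast at hk; omega) hres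
          intro q hq
          simp only [Option.some.injEq] at hq
          subst hq
          refine ⟨hold.2.1, by rw [hold.2.2.2.1]; omega, ?_, ?_⟩
          · intro y hy h; rw [hold.2.2.2.1] at h; omega
          · intro y hy hfy
            rw [hold.2.2.2.1] at hfy
            exact (hold.2.2.2.2 y hy hfy).2
        · have hstep : scanStep b st i = (max st.1 (lo - p), some hi) := by
            unfold scanStep; rw [hg, hst]
          obtain ⟨hp1, hp2, hp3, hp4⟩ := hprev p hst
          have hplo : p < lo := by
            by_contra hcon
            push_neg at hcon
            have hm := bidx_mono mn size lo p hs hcon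
            rw [hold.2.2.1] at hm
            omega
          have hnb : ∀ y ∈ nums, y ≤ p ∨ lo ≤ y := by
            intro y hy
            by_contra hcon
            push_neg at hcon
            obtain ⟨h1, h2⟩ := hcon
            have hge : bidx mn size p ≤ bidx mn size y := bidx_mono mn size p y hs (le_of_lt h1)
            have hle : bidx mn size y ≤ bidx mn size lo := bidx_mono mn size y lo hs (le_of_lt h2)
            rw [hold.2.2.1] at hle
            rcases eq_or_lt_of_le hge with heq | hlt2
            · exact absurd (hp4 y hy heq.symm) (by omega)
            · have h3 := hp3 y hy hlt2
              have h4 : bidx mn size y = i := by omega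
              have h5 := (hold.2.2.2.2 y hy h4).1
              omega
          have hcontrib : lo - p ≤ A := hbetween p lo hp1 hold.1 hplo hnb
          rw [hstep]
          apply ih (i + 1) (max st.1 (lo - p), some hi) (by push_cast; push_cast at hk; omega)
            (max_le hres hcontrib)
          intro q hq
          simp only [Option.some.injEq] at hq
          subst hq
          refine ⟨hold.2.1, by rw [hold.2.2.2.1]; omega, ?_, ?_⟩
          · intro y hy h; rw [hold.2.2.2.1] at h; omega
          · intro y hy hfy
            rw [hold.2.2.2.1] at hfy
            exact (hold.2.2.2.2 y hy hfy).2
    · rw [PySem.List.pyRange_one_eq_nil (by omega)]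
      exact hres

-- scan lower bound: the result dominates every cross-bucket no-element-between gap
theorem scan_lb (nums : List Int) (mn size nb : Int) (b : PySem.Dict Int (Int × Int))
    (hs : 0 < size)
    (hchar : BChar (bidx mn size) nums b) :
    ∀ (k : Nat) (i : Int) (st : Int × Option Int), nb - i ≤ (k : Int) →
      0 ≤ st.1 →
      (st.2 = none → ∀ y ∈ nums, ¬ bidx mn size y < i) →
      (∀ p, st.2 = some p → p ∈ nums ∧ bidx mn size p < i ∧
        ∀ y ∈ nums, bidx mn size y < i → y ≤ p) →
      (∀ a c, a ∈ nums → c ∈ nums → bidx mn size c < i → bidx mn size a < bidx mn size c →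
        (∀ y ∈ nums, y ≤ a ∨ c ≤ y) → c - a ≤ st.1) →
      0 ≤ ((PySem.List.pyRange i nb 1).foldl (scanStep b) st).1 ∧
      (∀ a c, a ∈ nums → c ∈ nums → bidx mn size c < nb → bidx mn size a < bidx mn size c →
        (∀ y ∈ nums, y ≤ a ∨ c ≤ y) →
        c - a ≤ ((PySem.List.pyRange i nb 1).foldl (scanStep b) st).1) := by
  intro k
  induction k with
  | zero =>
    intro i st hk hres _ _ hpairs
    rw [PySem.List.pyRange_one_eq_nil (by exact_mod_cast le_of_sub_nonpos (by simpa using hk))]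
    refine ⟨hres, ?_⟩
    intro a c ha hc hcnb hfac hbt
    have : bidx mn size c < i := by push_cast at hk; omega
    exact hpairs a c ha hc this hfac hbt
  | succ k ih =>
    intro i st hk hres hnone hprev hpairs
    by_cases hlt : i < nb
    · rw [PySem.List.pyRange_one_cons hlt]
      simp only [List.foldl_cons]
      rcases hg : b.get? i with _ | ⟨lo, hi⟩
      · have hstep : scanStep b st i = st := by unfold scanStep; rw [hg]
        rw [hstep]
        apply ih (i + 1) st (by push_cast; push_cast at hk; omega) hres
        · intro h y hy
          have h1 := hnone h y hy
          have hne : bidx mn size y ≠ i := (hchar i).1 hg y hy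
          omega
        · intro p hp
          obtain ⟨hp1, hp2, hp3⟩ := hprev p hp
          refine ⟨hp1, by omega, ?_⟩
          intro y hy hyi
          have hne : bidx mn size y ≠ i := (hchar i).1 hg y hy
          exact hp3 y hy (by omega)
        · intro a c ha hc hci hfac hbt
          have hne : bidx mn size c ≠ i := (hchar i).1 hg c hc
          exact hpairs a c ha hc (by omega) hfac hbt
      · have hold := (hchar i).2 lo hi hg
        rcases hst : st.2 with _ | p
        · have hstep : scanStep b st i = (st.1, some hi) := by unfold scanStep; rw [hg, hst]
          rw [hstep]
          apply ih (i + 1) (st.1, some hi) (by push_cast; push_cast at hk; omega) hres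
          · intro h; exact absurd h (by simp)
          · intro q hq
            simp only [Option.some.injEq] at hq
            subst hq
            refine ⟨hold.2.1, by rw [hold.2.2.2.1]; omega, ?_⟩
            intro y hy hyi
            by_cases hyi2 : bidx mn size y = i
            · exact (hold.2.2.2.2 y hy hyi2).2
            · exact absurd (by omega : bidx mn size y < i) (hnone hst y hy)
          · intro a c ha hc hci hfac hbt
            by_cases hci2 : bidx mn size c = i
            · exact absurd (by omega : bidx mn size a < i) (hnone hst a ha)
            · exact hpairs a c ha hc (by omega) hfac hbt
        · have hstep : scanStep b st i = (max st.1 (lo - p), some hi) := by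
            unfold scanStep; rw [hg, hst]
          rw [hstep]
          obtain ⟨hp1, hp2, hp3⟩ := hprev p hst
          apply ih (i + 1) (max st.1 (lo - p), some hi) (by push_cast; push_cast at hk; omega)
            (le_trans hres (le_max_left _ _))
          · intro h; exact absurd h (by simp)
          · intro q hq
            simp only [Option.some.injEq] at hq
            subst hq
            refine ⟨hold.2.1, by rw [hold.2.2.2.1]; omega, ?_⟩
            intro y hy hyi
            by_cases hyi2 : bidx mn size y = i
            · exact (hold.2.2.2.2 y hy hyi2).2
            · have h1 := hp3 y hy (by omega)
              have hplo : p < lo := by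
                by_contra hcon
                push_neg at hcon
                have hm := bidx_mono mn size lo p hs hcon
                rw [hold.2.2.1] at hm
                omega
              have hlohi : lo ≤ hi := by
                have := (hold.2.2.2.2 lo hold.1 hold.2.2.1).2
                exact this
              omega
          · intro a c ha hc hci hfac hbt
            by_cases hci2 : bidx mn size c = i
            · -- c is in bucket i: show a = p and c = lo
              have hca : c = lo := by
                have h1 := (hold.2.2.2.2 c hc hci2).1
                rcases hbt lo hold.1 with h2 | h2
                · have hm := bidx_mono mn size lo a hs h2
                  rw [hold.2.2.1] at hm
                  omega
                · omega
              have hap : a = p := by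
                have h1 : a ≤ p := hp3 a ha (by omega)
                rcases hbt p hp1 with h2 | h2
                · omega
                · have hm := bidx_mono mn size c p hs h2
                  omega
              subst hca; subst hap
              exact le_max_right _ _
            · have := hpairs a c ha hc (by omega) hfac hbt
              exact le_trans this (le_max_left _ _)
    · rw [PySem.List.pyRange_one_eq_nil (by omega)]
      refine ⟨hres, ?_⟩
      intro a c ha hc hcnb hfac hbt
      exact hpairs a c ha hc (by omega) hfac hbt

-- B's result is the maximal adjacent gap of the strictly sorted distinct values
theorem thmB (nums : List Int) :
    max_gap2_alt nums = adjMax (PySem.List.sorted (PySem.Set.ofList nums) (fun x => x) false) := by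
  have hSlt : (PySem.List.sorted (PySem.Set.ofList nums) (fun x => x) false).Pairwise (· < ·) :=
    PySem.List.sorted_ofList_pairwise_lt (xs := nums)
  have hSle : (PySem.List.sorted (PySem.Set.ofList nums) (fun x => x) false).Pairwise (· ≤ ·) :=
    hSlt.imp le_of_lt
  have memS : ∀ x, x ∈ PySem.List.sorted (PySem.Set.ofList nums) (fun x => x) false ↔ x ∈ nums := by
    intro x
    rw [PySem.List.mem_sorted, PySem.Set.mem_ofList]
  have hSlen : (PySem.List.sorted (PySem.Set.ofList nums) (fun x => x) false).length ≤ nums.length := by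
    rw [PySem.List.length_sorted]
    exact PySem.Set.length_ofList_le nums
  set S := PySem.List.sorted (PySem.Set.ofList nums) (fun x => x) false with hSdef
  unfold max_gap2_alt
  by_cases hn : (nums.length : Int) < 2
  · rw [if_pos hn]
    exact (adjMax_short S (by omega : S.length ≤ 1)).symm
  · rw [if_neg hn]
    have hnn : nums ≠ [] := by
      intro h; subst h; simp at hn
    rcases hmn : PySem.List.min? nums (fun x => x) with _ | mn
    · exact absurd ((PySem.List.min?_eq_none_iff (xs := nums) (key := fun x => x)).mp hmn) hnn
    rcases hmx : PySem.List.max? nums (fun x => x) with _ | mx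
    · exact absurd ((PySem.List.max?_eq_none_iff (xs := nums) (key := fun x => x)).mp hmx) hnn
    dsimp only
    have hmnm : mn ∈ nums := PySem.List.min?_mem hmn
    have hmxm : mx ∈ nums := PySem.List.max?_mem hmx
    have hmnlb : ∀ y ∈ nums, mn ≤ y := fun y hy => PySem.List.min?_isMin hmn y hy
    have hmxub : ∀ y ∈ nums, y ≤ mx := fun y hy => PySem.List.max?_isMax hmx y hy
    by_cases hee : mn = mx
    · rw [if_pos hee]
      refine (adjMax_short S ?_).symm
      match hS : S, hSlt with
      | [], _ => simp
      | [a], _ => simp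
      | a :: b :: t, hSlt2 =>
        exfalso
        have hab : a < b := (List.pairwise_cons.mp hSlt2).1 b (by simp)
        have ham : a ∈ nums := (memS a).mp (by simp)
        have hbm : b ∈ nums := (memS b).mp (by simp)
        have h1 := hmnlb a ham
        have h2 := hmxub a ham
        have h3 := hmnlb b hbm
        have h4 := hmxub b hbm
        omega
    · rw [if_neg hee]
      have hmnmx : mn < mx := lt_of_le_of_ne (hmnlb mx hmxm) hee
      -- names
      set n : Int := (nums.length : Int) with hndef
      set q : Int := PySem.Int.floordiv (mx - mn) (n - 1) with hqdef
      set size : Int := max 1 q with hsizedef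
      set nb : Int := PySem.Int.floordiv (mx - mn) size + 1 with hnbdef
      have hs : 0 < size := lt_of_lt_of_le one_pos (by rw [hsizedef]; exact le_max_left _ _)
      have hn1 : (0 : Int) < n - 1 := by omega
      -- the bucket dict is correct
      have hchar : BChar (bidx mn size) nums (nums.foldl (bucketStep size mn) PySem.Dict.empty) := by
        have := bchar_fold size mn nums [] PySem.Dict.empty (bchar_empty size mn)
        simpa using this
      set b := nums.foldl (bucketStep size mn) PySem.Dict.empty with hbdef
      set R := ((PySem.List.pyRange 0 nb 1).foldl (scanStep b) ((0 : Int), (none : Option Int))).1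
        with hRdef
      show R = adjMax S
      -- adjMax is nonnegative
      have hA0 : 0 ≤ adjMax S := adjMax_nonneg S hSle
      -- every bucket index of an element is < nb
      have hnbub : ∀ c ∈ nums, bidx mn size c < nb := by
        intro c hc
        have h1 : bidx mn size c ≤ bidx mn size mx := bidx_mono mn size c mx hs (hmxub c hc)
        have h2 : bidx mn size mx = nb - 1 := by
          rw [hnbdef]; unfold bidx; omega
        omega
      -- upper bound: R ≤ adjMax S
      have hub : R ≤ adjMax S := by
        rw [hRdef]
        refine scan_ub nums mn size nb (adjMax S) b hs hchar ?_ nb.toNat 0 (0, none)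
          (by simpa using Int.self_le_toNat nb) hA0 (by simp)
        intro a c ha hc hlt hbt
        exact between_le_adjMax S hSlt a c ((memS a).mpr ha) ((memS c).mpr hc) hlt
          (fun y hy => hbt y ((memS y).mp hy))
      -- lower bound machinery
      have hfnonneg : ∀ y ∈ nums, 0 ≤ bidx mn size y := by
        intro y hy
        have h1 : bidx mn size mn ≤ bidx mn size y := bidx_mono mn size mn y hs (hmnlb y hy)
        rw [bidx_self mn size hs] at h1
        exact h1
      have hlb := scan_lb nums mn size nb b hs hchar nb.toNat 0 (0, none)
        (by simpa using Int.self_le_toNat nb) (le_refl 0)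
        (fun _ y hy => by have := hfnonneg y hy; omega)
        (fun p hp => by simp at hp)
        (fun a c _ hc hci _ _ => absurd hci (by have := hfnonneg c hc; omega))
      have hR0 : 0 ≤ R := hlb.1
      have hcross := hlb.2
      -- pigeonhole: size ≤ adjMax S
      have hsizeA : size ≤ adjMax S := by
        have hmnS : mn ∈ S := (memS mn).mpr hmnm
        obtain ⟨s, t, hS⟩ := List.exists_cons_of_ne_nil (List.ne_nil_of_mem hmnS)
        have hSle2 : (s :: t).Pairwise (· ≤ ·) := hS ▸ hSle
        have hSlen2 : (s :: t).length ≤ nums.length := hS ▸ hSlen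
        have hspan := span_le s t hSle2 mx (hS ▸ (memS mx).mpr hmxm)
        have hsmn : s ≤ mn := head_lb s t hSle2 mn (hS ▸ hmnS)
        have hA : adjMax S = gapMax s t := by rw [hS]; rfl
        rw [← hA] at hspan
        have htl : (t.length : Int) ≤ n - 1 := by
          rw [hndef]
          have h2 : t.length + 1 ≤ nums.length := by
            simp only [List.length_cons] at hSlen2
            omega
          push_cast
          omega
        have htl0 : (0 : Int) ≤ (t.length : Int) := by positivity
        have hq := fd_bounds (mx - mn) (n - 1) hn1
        rw [← hqdef] at hq
        have hspan2 : mx - mn ≤ adjMax S * (t.length : Int) := by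
          have h3 : mx - s ≤ adjMax S * (t.length : Int) := by exact_mod_cast hspan
          omega
        rcases le_total q 1 with hq1 | hq1
        · have hsize1 : size ≤ 1 := by rw [hsizedef]; omega
          by_contra hcon
          push_neg at hcon
          have hAle : adjMax S ≤ 0 := by omega
          nlinarith
        · have hsize1 : size = q := by rw [hsizedef]; omega
          rw [hsize1]
          by_contra hcon
          push_neg at hcon
          have hAle : adjMax S ≤ q - 1 := by omega
          nlinarith [mul_le_mul_of_nonneg_right hAle htl0,
            mul_le_mul_of_nonneg_left htl (by omega : (0:Int) ≤ q - 1)]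
      -- adjMax S ≤ max (size - 1) R
      have hmax : adjMax S ≤ max (size - 1) R := by
        refine adjMax_le_of_gaps S (max (size - 1) R) (le_max_of_le_left (by omega)) hSlt ?_
        intro a c haS hcS hac hbt
        have ha : a ∈ nums := (memS a).mp haS
        have hc : c ∈ nums := (memS c).mp hcS
        by_cases hfac : bidx mn size a = bidx mn size c
        · have := same_bucket_gap mn size a c hs (le_of_lt hac) hfac
          exact le_max_of_le_left (by omega)
        · have hle : bidx mn size a ≤ bidx mn size c := bidx_mono mn size a c hs (le_of_lt hac)
          have hlt2 : bidx mn size a < bidx mn size c := lt_of_le_of_ne hle hfac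
          refine le_max_of_le_right (hcross a c ha hc (hnbub c hc) hlt2 ?_)
          intro y hy
          exact hbt y ((memS y).mpr hy)
      rcases le_total (size - 1) R with hmr | hmr
      · rw [max_eq_right hmr] at hmax
        omega
      · rw [max_eq_left hmr] at hmax
        omega

-- ===== VERDICT (by name: the statement is the Claim_ definition above) =====
theorem max_gap2_spec : Claim_equal_max_gap2 := by
  intro nums _
  unfold Spec_max_gap2
  rw [thmA, thmB]
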